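-- pv_equiv track=rewrite | github.com/omarabdelhaq02/CompAssignmentsS22 | Python/rm_smallest.py | rm_smallest
-- ===== SOURCE A (Python) =====
-- def rm_smallest(d):
--     dict_vals = set()
--     first_time = True
--     smallest_term = 0
--     for key in d:
--         dict_vals.add(d[key])
--     for element in dict_vals:
--         if first_time == True:
--             smallest_term = element
--             first_time = False
--         elif element < smallest_term:
--             smallest_term = element
--     for value in d:
--         if d[value] == smallest_term:
--             d.pop(value)
--             return d
--     return d;
-- ===== SOURCE B (Python) =====
-- def rm_smallest(d):
--     # Single pass tracking the winning (key, value) pair; mutates d in place like A.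
--     best = None
--     for k, v in d.items():
--         if best is None or v < best[1]:
--             best = (k, v)
--     if best is not None:
--         d.pop(best[0])
--     return d
-- ===== Notes on version B (the rewrite author's own statement) =====
-- stated objective: simpler
-- what changed: Replaces A's three passes (build a value set, scan it for the minimum, rescan the dict for the first key with that value) with one pass that tracks the winning (key, value) pair directly and pops that key afterwards.
import Mathlib
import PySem

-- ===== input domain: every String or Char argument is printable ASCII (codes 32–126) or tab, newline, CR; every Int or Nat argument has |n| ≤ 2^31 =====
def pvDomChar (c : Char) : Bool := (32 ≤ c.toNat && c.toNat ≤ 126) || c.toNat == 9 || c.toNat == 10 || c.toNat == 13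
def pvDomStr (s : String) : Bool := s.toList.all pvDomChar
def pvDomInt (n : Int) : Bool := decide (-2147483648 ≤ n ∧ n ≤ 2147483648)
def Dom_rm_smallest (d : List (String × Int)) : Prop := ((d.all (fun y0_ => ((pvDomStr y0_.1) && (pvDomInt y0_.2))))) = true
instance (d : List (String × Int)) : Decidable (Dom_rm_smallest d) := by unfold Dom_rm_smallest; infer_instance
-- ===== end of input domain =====

-- ===== PORT A =====
-- B replaces A's three passes with one pass tracking the winning (key, value) pair; both
-- mutate the Python dict in place and return it — the equivalence here is about the value.
-- A's third loop: 'for value in d: if d[value] == smallest: d.pop(value); return d'.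
-- Under Pre_ (no duplicate keys) d[value] at the visited key is that pair's value and
-- d.pop(value) removes exactly that pair, so this recursion is exact on Pre_.
def rmScanA (smallest : Int) : List (String × Int) → List (String × Int)
  | [] => []
  | kv :: rest => if kv.2 = smallest then rest else kv :: rmScanA smallest rest

def rm_smallest (d : List (String × Int)) : List (String × Int) :=
  -- dict_vals = set(); for key in d: dict_vals.add(d[key])
  let dict_vals : PySem.Set Int :=
    d.foldl (fun s kv => PySem.Set.add s kv.2) PySem.Set.empty
  -- first_time/smallest_term loop over the value set (min of a set: order-independent)
  let ms : Bool × Int :=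
    dict_vals.foldl
      (fun st e => if st.1 = true then (false, e)
                   else if e < st.2 then (false, e) else st)
      (true, 0)
  rmScanA ms.2 d

-- ===== PORT B =====
-- d.pop(best[0]): remove the (unique under Pre_) entry with that key.
def rmKeyB (k : String) : List (String × Int) → List (String × Int)
  | [] => []
  | kv :: rest => if kv.1 = k then rest else kv :: rmKeyB k rest

def rm_smallest_alt (d : List (String × Int)) : List (String × Int) :=
  let best : Option (String × Int) :=
    d.foldl
      (fun b kv => match b with
        | none => some kv
        | some bp => if kv.2 < bp.2 then some kv else some bp)
      none
  match best with
  | none => d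
  | some bp => rmKeyB bp.1 d

-- ===== PRECONDITION & SPEC =====
-- Pre_ excludes association lists with duplicate keys: those do not represent a Python
-- dict (dict construction collapses duplicates), so the Lean input and the Python input diverge.
def Pre_rm_smallest (d : List (String × Int)) : Prop := (d.map Prod.fst).Nodup
instance (d : List (String × Int)) : Decidable (Pre_rm_smallest d) := by
  unfold Pre_rm_smallest; infer_instance
def pvWitness_rm_smallest : (List (String × Int)) := [("a", 1), ("b", 0)]

def Spec_rm_smallest (d : List (String × Int)) (out : List (String × Int)) : Prop := out = rm_smallest_alt d
instance (d : List (String × Int)) (out : List (String × Int)) : Decidable (Spec_rm_smallest d out) := by unfold Spec_rm_smallest; infer_instance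

-- ===== CLAIM (what is proved, stated in full; the proofs are below) =====
def Claim_equal_rm_smallest : Prop := ∀ (d : List (String × Int)), Dom_rm_smallest d → Pre_rm_smallest d → Spec_rm_smallest d (rm_smallest d)

-- ===== LEMMAS AND PROOFS =====

-- the pure content of B's fold once the accumulator is 'some bp'
def getBest (bp : String × Int) (l : List (String × Int)) : String × Int :=
  l.foldl (fun b kv => if kv.2 < b.2 then kv else b) bp

theorem foldB_some (l : List (String × Int)) (bp : String × Int) :
    l.foldl
      (fun b kv => match b with
        | none => some kv
        | some bp => if kv.2 < bp.2 then some kv else some bp)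
      (some bp) = some (getBest bp l) := by
  induction l generalizing bp with
  | nil => rfl
  | cons kv rest ih =>
    simp only [List.foldl, getBest]
    by_cases h : kv.2 < bp.2 <;> simp [h, ih, getBest]

theorem getBest_mem (bp : String × Int) (l : List (String × Int)) :
    getBest bp l ∈ bp :: l := by
  induction l generalizing bp with
  | nil => simp [getBest]
  | cons kv rest ih =>
    have hstep : getBest bp (kv :: rest) = getBest (if kv.2 < bp.2 then kv else bp) rest := rfl
    rw [hstep]
    by_cases h : kv.2 < bp.2
    · rw [if_pos h]
      rcases List.mem_cons.mp (ih kv) with h1 | h1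
      · rw [h1]; simp
      · exact List.mem_cons_of_mem _ (List.mem_cons_of_mem _ h1)
    · rw [if_neg h]
      rcases List.mem_cons.mp (ih bp) with h1 | h1
      · rw [h1]; simp
      · exact List.mem_cons_of_mem _ (List.mem_cons_of_mem _ h1)

theorem getBest_le (bp : String × Int) (l : List (String × Int)) :
    (getBest bp l).2 ≤ bp.2 ∧ ∀ x ∈ l, (getBest bp l).2 ≤ x.2 := by
  induction l generalizing bp with
  | nil => simp [getBest]
  | cons kv rest ih =>
    simp only [getBest, List.foldl]
    by_cases h : kv.2 < bp.2
    · simp only [h, if_pos]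
      refine ⟨le_of_lt (lt_of_le_of_lt (ih kv).1 h), ?_⟩
      intro x hx
      rcases List.mem_cons.mp hx with h1 | h1
      · exact h1 ▸ (ih kv).1
      · exact (ih kv).2 x h1
    · simp only [h, if_neg, not_false_iff]
      refine ⟨(ih bp).1, ?_⟩
      intro x hx
      rcases List.mem_cons.mp hx with h1 | h1
      · exact h1 ▸ le_trans (ih bp).1 (le_of_not_gt h)
      · exact (ih bp).2 x h1

theorem getBest_of_le (bp : String × Int) (l : List (String × Int))
    (h : ∀ x ∈ l, bp.2 ≤ x.2) : getBest bp l = bp := by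
  induction l with
  | nil => rfl
  | cons kv rest ih =>
    simp only [getBest, List.foldl]
    have hk : ¬ kv.2 < bp.2 := not_lt.mpr (h kv (by simp))
    simp only [hk, if_neg, not_false_iff]
    exact ih (fun x hx => h x (List.mem_cons_of_mem _ hx))

-- a strict improver below both seeds makes the seed irrelevant
theorem getBest_seed_irrelevant (l : List (String × Int)) :
    ∀ bp bp', (∃ x ∈ l, x.2 < bp.2 ∧ x.2 < bp'.2) → getBest bp l = getBest bp' l := by
  induction l with
  | nil => rintro bp bp' ⟨x, hx, _⟩; cases hx
  | cons kv rest ih =>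
    rintro bp bp' ⟨x, hx, hx1, hx2⟩
    have hs : ∀ b : String × Int,
        getBest b (kv :: rest) = getBest (if kv.2 < b.2 then kv else b) rest := fun _ => rfl
    rw [hs bp, hs bp']
    rcases List.mem_cons.mp hx with rfl | hxr
    · rw [if_pos hx1, if_pos hx2]
    · by_cases h1 : kv.2 < bp.2 <;> by_cases h2 : kv.2 < bp'.2
      · rw [if_pos h1, if_pos h2]
      · rw [if_pos h1, if_neg h2]
        exact ih kv bp' ⟨x, hxr, lt_of_lt_of_le hx2 (le_of_not_gt h2), hx2⟩
      · rw [if_neg h1, if_pos h2]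
        exact ih bp kv ⟨x, hxr, hx1, lt_of_lt_of_le hx1 (le_of_not_gt h1)⟩
      · rw [if_neg h1, if_neg h2]
        exact ih bp bp' ⟨x, hxr, hx1, hx2⟩

-- B's fold value is the running minimum of the values
theorem getBest_snd (bp : String × Int) (l : List (String × Int)) :
    (getBest bp l).2 = (l.map Prod.snd).foldl min bp.2 := by
  induction l generalizing bp with
  | nil => rfl
  | cons kv rest ih =>
    have hstep : getBest bp (kv :: rest) = getBest (if kv.2 < bp.2 then kv else bp) rest := rfl
    rw [hstep]
    simp only [List.map, List.foldl]
    by_cases h : kv.2 < bp.2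
    · rw [if_pos h, ih kv, min_eq_right (le_of_lt h)]
    · rw [if_neg h, ih bp, min_eq_left (le_of_not_gt h)]

-- A's first_time/smallest loop, once started, is a min-fold
theorem foldA_started (l : List Int) (x : Int) :
    l.foldl
      (fun st e => if st.1 = true then ((false : Bool), e)
                   else if e < st.2 then (false, e) else st)
      (false, x) = (false, l.foldl min x) := by
  induction l generalizing x with
  | nil => rfl
  | cons e rest ih =>
    simp only [List.foldl, Bool.false_eq_true, if_false]
    by_cases h : e < x
    · simp [h, ih, min_eq_right (le_of_lt h)]
    · simp [h, ih, min_eq_left (le_of_not_gt h)]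

theorem foldA_min (v : Int) (rest : List Int) :
    (v :: rest).foldl
      (fun st e => if st.1 = true then ((false : Bool), e)
                   else if e < st.2 then (false, e) else st)
      ((true : Bool), 0) = (false, rest.foldl min v) := by
  simp only [List.foldl]
  exact foldA_started rest v

-- rmScanA and rmKeyB coincide on the best pair (keys nodup)
theorem scan_eq_key (l : List (String × Int)) : ∀ (kv : String × Int),
    ((kv :: l).map Prod.fst).Nodup →
    rmScanA (getBest kv l).2 (kv :: l) = rmKeyB (getBest kv l).1 (kv :: l) := by
  induction l with
  | nil => intro kv _; simp [getBest, rmScanA, rmKeyB]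
  | cons kv' l' ih =>
    intro kv hnd
    have hnd2 : kv.1 ∉ (kv' :: l').map Prod.fst ∧ ((kv' :: l').map Prod.fst).Nodup := by
      rw [List.map_cons, List.nodup_cons] at hnd; exact hnd
    by_cases hhead : kv.2 = (getBest kv (kv' :: l')).2
    · have hkv : getBest kv (kv' :: l') = kv :=
        getBest_of_le _ _
          (fun x hx => le_trans (le_of_eq hhead) ((getBest_le kv (kv' :: l')).2 x hx))
      rw [hkv]
      simp [rmScanA, rmKeyB]
    · have hqle := getBest_le kv (kv' :: l')
      have hqlt : (getBest kv (kv' :: l')).2 < kv.2 :=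
        lt_of_le_of_ne hqle.1 (fun h => hhead h.symm)
      have hqmem : getBest kv (kv' :: l') ∈ kv' :: l' := by
        rcases List.mem_cons.mp (getBest_mem kv (kv' :: l')) with h | h
        · exact absurd (congrArg Prod.snd h).symm hhead
        · exact h
      have hkeyne : kv.1 ≠ (getBest kv (kv' :: l')).1 :=
        fun h => hnd2.1 (h ▸ List.mem_map_of_mem hqmem)
      have hq' : getBest kv (kv' :: l') = getBest kv' l' := by
        have hs : getBest kv (kv' :: l') = getBest (if kv'.2 < kv.2 then kv' else kv) l' := rfl
        by_cases h : kv'.2 < kv.2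
        · rw [hs, if_pos h]
        · have hql' : getBest kv (kv' :: l') ∈ l' := by
            rcases List.mem_cons.mp hqmem with he | hm
            · exact absurd (he ▸ hqlt) h
            · exact hm
          rw [hs, if_neg h]
          exact getBest_seed_irrelevant l' kv kv'
            ⟨getBest kv (kv' :: l'), hql', hqlt, lt_of_lt_of_le hqlt (le_of_not_gt h)⟩
      have hrec := ih kv' hnd2.2
      rw [← hq'] at hrec
      show (if kv.2 = (getBest kv (kv' :: l')).2 then kv' :: l'
            else kv :: rmScanA (getBest kv (kv' :: l')).2 (kv' :: l')) =
           (if kv.1 = (getBest kv (kv' :: l')).1 then kv' :: l'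
            else kv :: rmKeyB (getBest kv (kv' :: l')).1 (kv' :: l'))
      rw [if_neg hhead, if_neg hkeyne, hrec]

-- ===== VERDICT (by name: the statement is the Claim_ definition above) =====
theorem rm_smallest_spec : Claim_equal_rm_smallest := by
  intro d _ hpre
  unfold Spec_rm_smallest
  cases d with
  | nil => rfl
  | cons kv l =>
    have hB : rm_smallest_alt (kv :: l) = rmKeyB (getBest kv l).1 (kv :: l) := by
      unfold rm_smallest_alt
      rw [show (kv :: l).foldl
            (fun b kv => match b with
              | none => some kv
              | some bp => if kv.2 < bp.2 then some kv else some bp)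
            none = l.foldl
            (fun b kv => match b with
              | none => some kv
              | some bp => if kv.2 < bp.2 then some kv else some bp)
            (some kv) from rfl, foldB_some]
    have hA : rm_smallest (kv :: l) = rmScanA (getBest kv l).2 (kv :: l) := by
      unfold rm_smallest
      have hvs : (kv :: l).foldl (fun s p => PySem.Set.add s p.2) PySem.Set.empty
          = PySem.Set.ofList ((kv :: l).map Prod.snd) := by
        simp [PySem.Set.ofList, List.foldl_map]
      rw [hvs]
      -- the value set is nonempty: destructure it
      cases hset : PySem.Set.ofList ((kv :: l).map Prod.snd) with
      | nil =>
        exact absurd ((PySem.Set.mem_ofList ((kv :: l).map Prod.snd) kv.2).mpr (by simp))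
          (by rw [hset]; exact List.not_mem_nil)
      | cons v0 vrest =>
        show rmScanA ((v0 :: vrest).foldl
            (fun st e => if st.1 = true then ((false : Bool), e)
                         else if e < st.2 then (false, e) else st)
            ((true : Bool), 0)).2 (kv :: l) = _
        rw [foldA_min]
        -- both minima are the minimum of the same (as sets) lists
        have hmemiff : ∀ x : Int, x ∈ v0 :: vrest ↔ x ∈ kv.2 :: l.map Prod.snd := by
          intro x
          rw [← hset, PySem.Set.mem_ofList, List.map_cons]
        have h1 := List.min?_eq_some_iff.mp
          (rfl : (v0 :: vrest).min? = some (vrest.foldl min v0))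
        have h2 := List.min?_eq_some_iff.mp
          (rfl : (kv.2 :: l.map Prod.snd).min? = some ((l.map Prod.snd).foldl min kv.2))
        have hmins : vrest.foldl min v0 = (l.map Prod.snd).foldl min kv.2 :=
          le_antisymm
            (h1.2 _ ((hmemiff _).mpr h2.1))
            (h2.2 _ ((hmemiff _).mp h1.1))
        show rmScanA (vrest.foldl min v0) (kv :: l) = _
        rw [hmins, ← getBest_snd]
    rw [hA, hB]
    exact scan_eq_key l kv hpre
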